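-- pv_equiv track=rewrite | github.com/manwar/perlweeklychallenge-club | challenge-347/lubos-kolouch/python/ch-2.py | format_phone_number
-- ===== SOURCE A (Python) =====
-- def format_phone_number(text: str) -> str:
--     """Group phone digits from the left using 3-digit blocks with special tail handling."""
--     if any(ch for ch in text if ch not in "0123456789 -"):
--         raise ValueError("Invalid characters in phone number")
--
--     digits = "".join(ch for ch in text if ch.isdigit())
--     if len(digits) < 2:
--         raise ValueError("Phone number requires at least two digits")
--
--     blocks: list[str] = []
--     idx = 0
--     while len(digits) - idx > 4:
--         blocks.append(digits[idx:idx + 3])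
--         idx += 3
--
--     tail = digits[idx:]
--     if len(tail) == 4:
--         blocks.extend([tail[:2], tail[2:]])
--     elif tail:
--         blocks.append(tail)
--
--     return "-".join(blocks)
-- ===== SOURCE B (Python) =====
-- def format_phone_number(text: str) -> str:
--     """Group phone digits from the left using 3-digit blocks with special tail handling."""
--     if any(ch for ch in text if ch not in "0123456789 -"):
--         raise ValueError("Invalid characters in phone number")
--
--     digits = "".join(ch for ch in text if ch.isdigit())
--     n = len(digits)
--     if n < 2:
--         raise ValueError("Phone number requires at least two digits")
--
--     # Tail block length is determined by n mod 3 (3 / 4->split as 2+2 / 2); a dash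
--     # follows digit i exactly when i is a 3-block boundary before the tail, or at
--     # the 2+2 split point of a length-4 tail.  Emit char by char, no slicing.
--     tail = {0: 3, 1: 4, 2: 2}[n % 3]
--     out = []
--     for i, d in enumerate(digits, 1):
--         out.append(d)
--         if (i % 3 == 0 and i <= n - tail) or (tail == 4 and i == n - 2):
--             out.append("-")
--     return "".join(out)
-- ===== Notes on version B (the rewrite author's own statement) =====
-- stated objective: alternative
-- what changed: Instead of slicing digit blocks and joining them, B emits the output character by character in one pass, deciding from a closed-form predicate on the position (3-block boundaries before the mod-3-determined tail, plus the 2+2 split point) whether a dash follows each digit.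
import Mathlib
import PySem

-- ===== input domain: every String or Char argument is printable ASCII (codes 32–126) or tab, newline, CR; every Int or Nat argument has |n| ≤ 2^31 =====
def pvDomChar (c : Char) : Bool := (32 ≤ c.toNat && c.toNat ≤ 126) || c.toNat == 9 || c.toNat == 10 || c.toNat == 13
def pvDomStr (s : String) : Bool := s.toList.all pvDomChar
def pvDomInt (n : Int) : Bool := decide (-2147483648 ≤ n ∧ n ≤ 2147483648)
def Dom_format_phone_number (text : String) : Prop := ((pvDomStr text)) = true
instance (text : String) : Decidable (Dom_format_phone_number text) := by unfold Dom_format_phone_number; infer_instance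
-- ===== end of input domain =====

-- B emits the formatted number char-by-char with a closed-form dash-position predicate instead of A's block slicing + join (alternative decomposition, same cost).


-- ===== PORT A =====
-- A: while-loop peeling 3-digit blocks while more than 4 digits remain, then tail handling, then "-".join.
def pvBlocksA (digits : List Char) : List (List Char) :=
  if digits.length > 4 then
    digits.take 3 :: pvBlocksA (digits.drop 3)
  else if digits.length = 4 then
    [digits.take 2, digits.drop 2]
  else if digits ≠ [] then [digits] else []
termination_by digits.length
decreasing_by simp [List.length_drop]; omega

def format_phone_number (text : String) : String :=
  let digits := text.toList.filter PySem.Chars.isdigit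
  String.mk (PySem.Chars.join ['-'] (pvBlocksA digits))

-- ===== PORT B =====
-- B: tail length from n % 3, then one pass over enumerate(digits, 1) emitting each digit
-- followed by a dash exactly where the closed-form predicate says so.
def pvTail (n : Nat) : Nat := if n % 3 = 0 then 3 else if n % 3 = 1 then 4 else 2

def pvEmitB (n tail : Nat) : Nat → List Char → List Char
  | _, [] => []
  | i, d :: rest =>
    (if (i % 3 = 0 ∧ i ≤ n - tail) ∨ (tail = 4 ∧ i = n - 2) then [d, '-'] else [d])
      ++ pvEmitB n tail (i + 1) rest

def format_phone_number_alt (text : String) : String :=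
  let digits := text.toList.filter PySem.Chars.isdigit
  let n := digits.length
  String.mk (pvEmitB n (pvTail n) 1 digits)

-- ===== PRECONDITION & SPEC =====
-- Pre_: exactly the inputs where A returns (no invalid character, at least two digits); A raises ValueError otherwise.
def Pre_format_phone_number (text : String) : Prop :=
  text.toList.all (fun ch => ch ∈ "0123456789 -".toList) = true ∧
  2 ≤ (text.toList.filter PySem.Chars.isdigit).length
instance (text : String) : Decidable (Pre_format_phone_number text) := by
  unfold Pre_format_phone_number; infer_instance
def pvWitness_format_phone_number : String := "123-456 78"

def Spec_format_phone_number (text : String) (out : String) : Prop := out = format_phone_number_alt text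
instance (text : String) (out : String) : Decidable (Spec_format_phone_number text out) := by unfold Spec_format_phone_number; infer_instance

-- ===== CLAIM =====
def Claim_equal_format_phone_number : Prop := ∀ (text : String), Dom_format_phone_number text → Pre_format_phone_number text → Spec_format_phone_number text (format_phone_number text)

-- ===== LEMMAS AND PROOFS =====

lemma pvTail_le (n : Nat) (h : 4 < n) : pvTail n + 3 ≤ n := by
  unfold pvTail; split_ifs <;> omega

lemma pvTail_sub3 (n : Nat) (h : 4 < n) : pvTail (n - 3) = pvTail n := by
  unfold pvTail
  have : (n - 3) % 3 = n % 3 := by omega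
  rw [this]

-- shifting the index by 3 equals shrinking n by 3 (once more than 4 digits remain)
lemma pvEmitB_shift (n tail : Nat) (htt : tail + 3 ≤ n) (h5 : 5 ≤ n) :
    ∀ (rest : List Char) (i : Nat), pvEmitB n tail (i + 3) rest = pvEmitB (n - 3) tail i rest := by
  intro rest
  induction rest with
  | nil => intro i; simp [pvEmitB]
  | cons d rest ih =>
    intro i
    have hc : ((i + 3) % 3 = 0 ∧ i + 3 ≤ n - tail) ∨ (tail = 4 ∧ i + 3 = n - 2) ↔
        (i % 3 = 0 ∧ i ≤ n - 3 - tail) ∨ (tail = 4 ∧ i = n - 3 - 2) := by omega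
    simp only [pvEmitB, hc]
    rw [show i + 3 + 1 = (i + 1) + 3 by omega, ih (i + 1)]

lemma pvBlocksA_ne_nil (l : List Char) (h : l ≠ []) : ∃ p q, pvBlocksA l = p :: q := by
  unfold pvBlocksA
  split_ifs <;> simp_all

lemma pvEmit_eq (n : Nat) : ∀ l : List Char, l.length = n → 2 ≤ n →
    PySem.Chars.join ['-'] (pvBlocksA l) = pvEmitB n (pvTail n) 1 l := by
  induction n using Nat.strong_induction_on with
  | _ n ih =>
    intro l hl h2
    by_cases h4 : n > 4
    · -- peel a 3-block on both sides
      rcases l with _ | ⟨a, l⟩; · simp at hl; omega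
      rcases l with _ | ⟨b, l⟩; · simp at hl; omega
      rcases l with _ | ⟨c, rest⟩; · simp at hl; omega
      have hrl : rest.length = n - 3 := by simp at hl; omega
      have hrne : rest ≠ [] := by intro he; rw [he] at hrl; simp at hrl; omega
      obtain ⟨p, q, hpq⟩ := pvBlocksA_ne_nil rest hrne
      have htt := pvTail_le n h4
      -- A side
      rw [pvBlocksA, if_pos (by simp; omega)]
      simp only [List.take, List.drop]
      rw [hpq, PySem.Chars.join_cons_cons, ← hpq,
        ih (n - 3) (by omega) rest hrl (by omega)]
      -- B side
      have h1 : ¬((1 % 3 = 0 ∧ 1 ≤ n - pvTail n) ∨ (pvTail n = 4 ∧ 1 = n - 2)) := by omega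
      have hb2 : ¬((2 % 3 = 0 ∧ 2 ≤ n - pvTail n) ∨ (pvTail n = 4 ∧ 2 = n - 2)) := by omega
      simp only [pvEmitB, if_neg h1, if_neg hb2]
      rw [show (3 : Nat) + 1 = 1 + 3 by omega,
        pvEmitB_shift n (pvTail n) htt (by omega) rest 1, pvTail_sub3 n h4]
      simp
      rw [if_pos (Or.inl (show 3 ≤ n - pvTail n by omega))]
      simp
    · -- n ∈ {2, 3, 4}
      rcases l with _ | ⟨a, l⟩; · simp at hl; omega
      rcases l with _ | ⟨b, l⟩; · simp at hl; omega
      rcases l with _ | ⟨c, l⟩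
      · simp at hl; subst hl
        simp [pvBlocksA, pvEmitB, pvTail, PySem.Chars.join_singleton]
      rcases l with _ | ⟨d, l⟩
      · simp at hl; subst hl
        simp [pvBlocksA, pvEmitB, pvTail, PySem.Chars.join_singleton]
      rcases l with _ | ⟨e, l⟩
      · simp at hl; subst hl
        simp [pvBlocksA, pvEmitB, pvTail, PySem.Chars.join_cons_cons,
          PySem.Chars.join_singleton]
      · simp at hl; omega

-- ===== VERDICT =====
theorem format_phone_number_spec : Claim_equal_format_phone_number := by
  intro text _ hpre
  unfold Spec_format_phone_number format_phone_number format_phone_number_alt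
  simp only []
  rw [pvEmit_eq (text.toList.filter PySem.Chars.isdigit).length _ rfl hpre.2]
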